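-- pv_equiv track=rewrite | github.com/ShasoFace/Pythonproj | datecalc.py | year_day
-- ===== SOURCE A (Python) =====
-- def schalt(j):
--     return (j % 4 == 0 and j % 100 != 0) or j % 400 == 0
--
-- def year_day(j):
--     day = 0
--     for i in range(1,j):
--         if schalt(i):
--             day = day + 366
--         else:
--             day = day + 365
--     return day
-- ===== SOURCE B (Python) =====
-- def year_day(j):
--     # Closed form: 365 days per year plus one per leap year among 1..j-1.
--     n = j - 1
--     if n <= 0:
--         return 0
--     return 365 * n + n // 4 - n // 100 + n // 400
-- ===== Notes on version B (the rewrite author's own statement) =====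
-- stated objective: faster
-- what changed: Replaces the per-year accumulation loop with a closed-form expression counting leap years via integer floor divisions.
import Mathlib
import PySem

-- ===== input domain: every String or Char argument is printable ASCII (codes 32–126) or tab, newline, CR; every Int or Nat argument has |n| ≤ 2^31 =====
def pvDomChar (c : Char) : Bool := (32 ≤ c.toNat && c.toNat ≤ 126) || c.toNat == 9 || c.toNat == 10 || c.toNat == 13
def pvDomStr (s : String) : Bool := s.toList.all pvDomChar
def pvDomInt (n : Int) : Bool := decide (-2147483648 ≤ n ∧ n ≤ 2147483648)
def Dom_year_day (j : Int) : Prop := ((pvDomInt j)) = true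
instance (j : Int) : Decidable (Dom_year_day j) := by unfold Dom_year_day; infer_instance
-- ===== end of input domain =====

-- B computes the result in closed form (leap years counted by floor divisions) instead of A's per-year loop.


-- ===== PORT A =====
def schalt (j : Int) : Bool :=
  (PySem.Int.mod j 4 == 0 && !(PySem.Int.mod j 100 == 0)) || PySem.Int.mod j 400 == 0

def year_day (j : Int) : Int :=
  (PySem.List.pyRange 1 j 1).foldl
    (fun day i => if schalt i then day + 366 else day + 365) 0

-- ===== PORT B =====
def year_day_alt (j : Int) : Int :=
  let n := j - 1
  if n ≤ 0 then 0
  else 365 * n + PySem.Int.floordiv n 4 - PySem.Int.floordiv n 100 + PySem.Int.floordiv n 400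

-- ===== PRECONDITION & SPEC =====
def Spec_year_day (j : Int) (out : Int) : Prop := out = year_day_alt j
instance (j : Int) (out : Int) : Decidable (Spec_year_day j out) := by unfold Spec_year_day; infer_instance

-- ===== CLAIM (what is proved, stated in full; the proofs are below) =====
def Claim_equal_year_day : Prop := ∀ (j : Int), Dom_year_day j → Spec_year_day j (year_day j)

-- ===== LEMMAS AND PROOFS =====

-- closed form as a function of n = j - 1, for n ≥ 0
theorem year_day_alt_of_pos (j : Int) (h : 1 < j) :
    year_day_alt j = 365 * (j-1) + PySem.Int.floordiv (j-1) 4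
      - PySem.Int.floordiv (j-1) 100 + PySem.Int.floordiv (j-1) 400 := by
  simp only [year_day_alt]
  rw [if_neg (by omega)]

theorem year_day_key (n : ℕ) : year_day ((n : Int) + 1) = year_day_alt ((n : Int) + 1) := by
  induction n with
  | zero =>
      simp [year_day, year_day_alt, PySem.List.pyRange_one_eq_nil]
  | succ m ih =>
      have hsplit : PySem.List.pyRange 1 ((m : Int) + 1 + 1) 1
          = PySem.List.pyRange 1 ((m : Int) + 1) 1 ++ [(m : Int) + 1] := by
        exact PySem.List.pyRange_one_succ_right (by omega)
      simp only [year_day] at ih ⊢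
      push_cast
      rw [show (m : Int) + 1 + 1 = ((m : Int) + 1) + 1 by ring] at hsplit ⊢
      rw [hsplit, List.foldl_append, ih]
      by_cases hm : m = 0
      · subst hm
        simp [year_day_alt, schalt, PySem.Int.mod, PySem.Int.floordiv]
      · have h1 : (1 : Int) < (m : Int) + 1 := by omega
        rw [year_day_alt_of_pos ((m : Int) + 1 + 1) (by omega), year_day_alt_of_pos ((m : Int) + 1) h1]
        simp only [List.foldl_cons, List.foldl_nil]
        simp only [schalt, PySem.Int.mod_eq_emod_of_pos (by omega : (0:Int) < 4),
          PySem.Int.mod_eq_emod_of_pos (by omega : (0:Int) < 100),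
          PySem.Int.mod_eq_emod_of_pos (by omega : (0:Int) < 400),
          PySem.Int.floordiv_eq_ediv_of_pos (by omega : (0:Int) < 4),
          PySem.Int.floordiv_eq_ediv_of_pos (by omega : (0:Int) < 100),
          PySem.Int.floordiv_eq_ediv_of_pos (by omega : (0:Int) < 400)]
        split_ifs with h <;>
          simp only [Bool.or_eq_true, Bool.and_eq_true, Bool.not_eq_true', beq_iff_eq,
            beq_eq_false_iff_ne, ne_eq] at h
        · rcases h with ⟨h4, h100⟩ | h400 <;> omega
        · push Not at h
          obtain ⟨himp, h400⟩ := h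
          by_cases h4 : ((m : Int) + 1) % 4 = 0
          · have h100 := himp h4
            omega
          · omega

-- ===== VERDICT (by name: the statement is the Claim_ definition above) =====
theorem year_day_spec : Claim_equal_year_day := by
  intro j _
  unfold Spec_year_day
  by_cases h : j ≤ 1
  · simp [year_day, year_day_alt, PySem.List.pyRange_one_eq_nil (by omega : j ≤ 1)]
    omega
  · have : j = ((j - 1).toNat : Int) + 1 := by omega
    rw [this]
    exact year_day_key _
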